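-- pv_equiv track=rewrite | github.com/Jarulios/Loveletter | data_gen.py | countess_check
-- ===== SOURCE A (Python) =====
-- def countess_check(hand):
--     flag1, flag2 = False, False
--     for i in hand:
--         if i == 5:
--             flag2 = True
--         elif i == 7:
--             flag1 = True
--         elif i == 8:
--             flag2 = True
--         elif i == 6:
--             flag2 = True
--         else:
--             return False
--     if flag1 and flag2:
--         return True
--     else:
--         return False
-- ===== SOURCE B (Python) =====
-- def countess_check(hand):
--     s = set(hand)
--     return bool(s <= {5, 6, 7, 8} and 7 in s and s & {5, 6, 8})
-- ===== Notes on version B (the rewrite author's own statement) =====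
-- stated objective: simpler
-- what changed: Replaces the flag-accumulating loop with early return by three set-algebra predicates over set(hand): subset of {5,6,7,8}, membership of 7, nonempty intersection with {5,6,8}.
import Mathlib
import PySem

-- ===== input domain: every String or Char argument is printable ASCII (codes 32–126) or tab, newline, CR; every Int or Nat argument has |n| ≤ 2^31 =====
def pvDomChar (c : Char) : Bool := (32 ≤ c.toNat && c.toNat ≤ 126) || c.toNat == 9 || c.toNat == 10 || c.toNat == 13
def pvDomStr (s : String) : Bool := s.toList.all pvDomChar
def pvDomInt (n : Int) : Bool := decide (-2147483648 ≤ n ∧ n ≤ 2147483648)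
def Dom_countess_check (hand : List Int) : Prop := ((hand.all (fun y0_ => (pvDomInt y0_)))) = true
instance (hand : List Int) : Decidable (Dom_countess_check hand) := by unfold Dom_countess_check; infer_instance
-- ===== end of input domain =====

-- B replaces A's flag-accumulating loop by three set-algebra predicates on set(hand) (simpler).

-- ===== PORT A =====
-- the for-loop of A, carrying the two flags; the final if collapses to f1 && f2
def countessLoop : List Int → Bool → Bool → Bool
  | [], flag1, flag2 => flag1 && flag2
  | i :: rest, flag1, flag2 =>
    if i == 5 then countessLoop rest flag1 true
    else if i == 7 then countessLoop rest true flag2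
    else if i == 8 then countessLoop rest flag1 true
    else if i == 6 then countessLoop rest flag1 true
    else false

def countess_check (hand : List Int) : Bool := countessLoop hand false false

-- ===== PORT B =====
def countess_check_alt (hand : List Int) : Bool :=
  let s : PySem.Set Int := PySem.Set.ofList hand
  PySem.Set.issubset s [5, 6, 7, 8] && PySem.Set.contains s 7
    && !(PySem.Set.inter s [5, 6, 8]).isEmpty

-- ===== PRECONDITION & SPEC =====
def Spec_countess_check (hand : List Int) (out : Bool) : Prop := out = countess_check_alt hand
instance (hand : List Int) (out : Bool) : Decidable (Spec_countess_check hand out) := by unfold Spec_countess_check; infer_instance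

-- ===== CLAIM (what is proved, stated in full; the proofs are below) =====
def Claim_equal_countess_check : Prop := ∀ (hand : List Int), Dom_countess_check hand → Spec_countess_check hand (countess_check hand)

-- ===== LEMMAS AND PROOFS =====

-- characterisation of A's loop in terms of the three hand-level predicates
theorem countessLoop_eq (hand : List Int) (f1 f2 : Bool) :
    countessLoop hand f1 f2 =
      (hand.all (fun x => x == 5 || x == 6 || x == 7 || x == 8)
        && (f1 || hand.contains 7)
        && (f2 || hand.any (fun x => x == 5 || x == 6 || x == 8))) := by
  induction hand generalizing f1 f2 with
  | nil => simp [countessLoop]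
  | cons i rest ih =>
    by_cases h5 : i = 5
    · subst h5; simp [countessLoop, ih]
    · by_cases h7 : i = 7
      · subst h7; simp [countessLoop, ih]
      · by_cases h8 : i = 8
        · subst h8; simp [countessLoop, ih]
        · by_cases h6 : i = 6
          · subst h6; simp [countessLoop, ih]
          · simp [countessLoop, h5, h6, h7, h8]

theorem countess_alt_iff (hand : List Int) :
    countess_check_alt hand = true ↔
      ((∀ x ∈ hand, x = 5 ∨ x = 6 ∨ x = 7 ∨ x = 8) ∧ (7 : Int) ∈ hand
        ∧ ∃ x ∈ hand, x = 5 ∨ x = 6 ∨ x = 8) := by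
  simp [countess_check_alt, PySem.Set.issubset, PySem.Set.contains, PySem.Set.inter,
    List.filter_eq_nil_iff, PySem.Set.mem_ofList]
  constructor
  · rintro ⟨⟨h1, h2⟩, x, hx, h3⟩
    exact ⟨h1, h2, x, hx, by tauto⟩
  · rintro ⟨h1, h2, x, hx, h3⟩
    exact ⟨⟨h1, h2⟩, x, hx, by tauto⟩

theorem countess_a_iff (hand : List Int) :
    countess_check hand = true ↔
      ((∀ x ∈ hand, x = 5 ∨ x = 6 ∨ x = 7 ∨ x = 8) ∧ (7 : Int) ∈ hand
        ∧ ∃ x ∈ hand, x = 5 ∨ x = 6 ∨ x = 8) := by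
  simp [countess_check, countessLoop_eq]
  constructor
  · rintro ⟨⟨h1, h2⟩, x, hx, h3⟩
    exact ⟨fun y hy => by have := h1 y hy; tauto, h2, x, hx, by tauto⟩
  · rintro ⟨h1, h2, x, hx, h3⟩
    exact ⟨⟨fun y hy => by have := h1 y hy; tauto, h2⟩, x, hx, by tauto⟩

-- ===== VERDICT (by name: the statement is the Claim_ definition above) =====
theorem countess_check_spec : Claim_equal_countess_check := by
  intro hand _
  unfold Spec_countess_check
  rw [Bool.eq_iff_iff, countess_a_iff, countess_alt_iff]
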